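-- pv_equiv track=rewrite | github.com/bjpl/conjugation_gui | src/security/validator.py | _has_repeated_patterns
-- ===== SOURCE A (Python) =====
-- def _has_repeated_patterns(text: str) -> bool:
--     """Check for repeated patterns in text."""
--     # Check for immediate repetitions
--     for i in range(1, len(text) // 2 + 1):
--         pattern = text[:i]
--         if text.startswith(pattern * (len(text) // i)):
--             return True
--
--     # Check for substring repetitions
--     for length in range(3, min(len(text) // 2, 8)):
--         seen_substrings = set()
--         for i in range(len(text) - length + 1):
--             substring = text[i:i + length]
--             if substring in seen_substrings:
--                 return True
--             seen_substrings.add(substring)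
--
--     return False
-- ===== SOURCE B (Python) =====
-- def _has_repeated_patterns(text: str) -> bool:
--     """Check for repeated patterns in text."""
--     n = len(text)
--     # Phase 1: some prefix of length i*(n//i) is i-periodic, tested by shift-compare
--     # (text[i:m] == text[:m-i]) instead of building the tiled string pattern*(n//i).
--     if any(text[i:i * (n // i)] == text[:i * (n // i) - i] for i in range(1, n // 2 + 1)):
--         return True
--     # Phase 2: a repeated substring of some length in range(3, min(n//2, 8)) exists
--     # iff a repeated trigram exists (take the first 3 chars of the two occurrences),
--     # so one set of trigrams suffices; the range is nonempty exactly when n >= 8.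
--     if n >= 8:
--         trigrams = [text[i:i + 3] for i in range(n - 2)]
--         return len(set(trigrams)) != len(trigrams)
--     return False
-- ===== Notes on version B (the rewrite author's own statement) =====
-- stated objective: alternative
-- what changed: Phase 1 tests i-periodicity of the prefix by a single shift-compare text[i:m]==text[:m-i] instead of constructing the tiled string pattern*(n//i) and calling startswith; phase 2 replaces the nested loop over five substring lengths with incremental seen-sets by one trigram list whose set-size is compared, using the fact that a repeated substring of length 3..7 exists iff a repeated trigram exists.
import Mathlib
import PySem

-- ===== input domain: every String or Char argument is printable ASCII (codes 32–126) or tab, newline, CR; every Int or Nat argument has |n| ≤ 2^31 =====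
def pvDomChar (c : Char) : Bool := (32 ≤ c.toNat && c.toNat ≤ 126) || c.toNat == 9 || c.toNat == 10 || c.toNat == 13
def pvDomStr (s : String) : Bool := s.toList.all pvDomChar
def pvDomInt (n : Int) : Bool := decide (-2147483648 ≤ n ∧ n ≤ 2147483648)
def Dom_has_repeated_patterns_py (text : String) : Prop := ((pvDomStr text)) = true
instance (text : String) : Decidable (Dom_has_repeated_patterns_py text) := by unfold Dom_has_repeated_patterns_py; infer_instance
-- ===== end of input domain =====

-- B replaces phase 1's tile-and-startswith test by a shift-compare of two slices and
-- phase 2's nested length-3..7 seen-set loops by a single trigram set-size comparison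
-- (alternative decomposition, no speed claim).

-- ===== PORT A =====
-- inner loop of A's phase 2: indices i with an incrementally built seen-set, early return on a repeat
-- (text[i:i+L] = (s.drop i).take L, exact here: 0 ≤ i and i+L ≤ len in every call)
def pvAScan (s : List Char) (L : Nat) : List Nat → PySem.Set (List Char) → Bool
  | [], _ => false
  | i :: rest, seen =>
    let substring := (s.drop i).take L
    if seen.contains substring then true
    else pvAScan s L rest (seen.add substring)

-- literal port of A; loops run over Nat ranges (range(1, n//2+1) = List.range' 1 (n/2),
-- range(3, min(n//2, 8)) = List.range' 3 (min (n/2) 8 - 3)); every index is nonneg and in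
-- range, so Nat division equals Python's // and text[:i] = s.take i exactly; pattern * k
-- is List.flatten (List.replicate k pattern), exact for k ≥ 0
def has_repeated_patterns_py (text : String) : Bool :=
  let s := text.toList
  let n := s.length
  if (List.range' 1 (n / 2)).any (fun i =>
        let pattern := s.take i
        PySem.Chars.startswith s (List.flatten (List.replicate (n / i) pattern)))
  then true
  else
    (List.range' 3 (min (n / 2) 8 - 3)).any (fun L =>
      pvAScan s L (List.range (n - L + 1)) PySem.Set.empty)

-- ===== PORT B =====
-- literal port of Source B (slices text[i:m], text[:m-i], text[i:i+3] have nonneg in-range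
-- bounds, where they are exactly (s.drop i).take (m-i) / s.take (m-i) / (s.drop i).take 3)
def has_repeated_patterns_py_alt (text : String) : Bool :=
  let s := text.toList
  let n := s.length
  if (List.range' 1 (n / 2)).any (fun i =>
        let m := i * (n / i)
        (s.drop i).take (m - i) == s.take (m - i))
  then true
  else if 8 ≤ n then
    let trigrams := (List.range (n - 2)).map (fun i => (s.drop i).take 3)
    (PySem.Set.ofList trigrams).length != trigrams.length
  else false

-- ===== PRECONDITION & SPEC =====
def Spec_has_repeated_patterns_py (text : String) (out : Bool) : Prop := out = has_repeated_patterns_py_alt text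
instance (text : String) (out : Bool) : Decidable (Spec_has_repeated_patterns_py text out) := by unfold Spec_has_repeated_patterns_py; infer_instance

-- ===== CLAIM (what is proved, stated in full; the proofs are below) =====
def Claim_equal_has_repeated_patterns_py : Prop := ∀ (text : String), Dom_has_repeated_patterns_py text → Spec_has_repeated_patterns_py text (has_repeated_patterns_py text)

-- ===== LEMMAS AND PROOFS =====

lemma mod_sub_self (i j : Nat) (h : i ≤ j) : (j - i) % i = j % i := by
  conv_rhs => rw [show j = i + (j - i) by omega]
  rw [Nat.add_mod_left]
lemma getElem?_flatten_replicate {p : List Char} {i : Nat} (hp : p.length = i) :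
    ∀ (k j : Nat), j < k * i → (List.flatten (List.replicate k p))[j]? = p[j % i]? := by
  intro k
  induction k with
  | zero => intro j hj; omega
  | succ k ih =>
    intro j hj
    have hj' : j < k * i + i := by have : (k+1) * i = k * i + i := by ring
                                   omega
    rw [List.replicate_succ, List.flatten_cons]
    by_cases hji : j < i
    · rw [List.getElem?_append_left (by omega), Nat.mod_eq_of_lt hji]
    · rw [List.getElem?_append_right (by omega), hp, ih (j - i) (by omega)]
      congr 1
      conv_rhs => rw [show j = i + (j - i) by omega]
      rw [Nat.add_mod_left]

lemma take_eq_flatten_iff_P (s : List Char) (i k : Nat) (hi : 1 ≤ i) (hk : 1 ≤ k)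
    (hm : i * k ≤ s.length) :
    (s.take (i * k) = List.flatten (List.replicate k (s.take i))) ↔
      ∀ j, j < i * k → s[j]? = s[j % i]? := by
  have hil : i ≤ s.length := by
    have : i * 1 ≤ i * k := Nat.mul_le_mul_left _ hk
    omega
  have hp : (s.take i).length = i := by rw [List.length_take]; omega
  have hc : k * i = i * k := Nat.mul_comm k i
  have hflat : ∀ j, j < i * k →
      (List.flatten (List.replicate k (s.take i)))[j]? = s[j % i]? := by
    intro j hj
    rw [getElem?_flatten_replicate hp k j (by omega : j < k * i)]
    exact List.getElem?_take_of_lt (Nat.mod_lt _ (by omega))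
  constructor
  · intro h j hj
    have := congrArg (fun l => l[j]?) h
    simp only at this
    rw [List.getElem?_take_of_lt hj] at this
    rw [this, hflat j hj]
  · intro h
    apply List.ext_getElem?
    intro j
    by_cases hj : j < i * k
    · rw [List.getElem?_take_of_lt hj, hflat j hj, h j hj]
    · rw [List.getElem?_take_eq_none (by omega),
        List.getElem?_eq_none (by
          have : (List.flatten (List.replicate k (s.take i))).length = k * (s.take i).length := by
            simp [List.length_flatten]
          rw [this, hp]; omega)]

lemma shift_iff_Q (s : List Char) (i m : Nat) :
    ((s.drop i).take (m - i) = s.take (m - i)) ↔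
      ∀ j, j < m - i → s[i + j]? = s[j]? := by
  constructor
  · intro h j hj
    have := congrArg (fun l => l[j]?) h
    simp only at this
    rw [List.getElem?_take_of_lt hj, List.getElem?_take_of_lt hj, List.getElem?_drop] at this
    exact this
  · intro h
    apply List.ext_getElem?
    intro j
    by_cases hj : j < m - i
    · rw [List.getElem?_take_of_lt hj, List.getElem?_take_of_lt hj, List.getElem?_drop, h j hj]
    · rw [List.getElem?_take_eq_none (by omega), List.getElem?_take_eq_none (by omega)]

lemma P_iff_Q (s : List Char) (i m : Nat) (hi : 1 ≤ i) :
    (∀ j, j < m → s[j]? = s[j % i]?) ↔ (∀ j, j < m - i → s[i + j]? = s[j]?) := by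
  constructor
  · intro h j hj
    rw [h (i + j) (by omega), h j (by omega), Nat.add_mod_left]
  · intro h j
    induction j using Nat.strong_induction_on with
    | _ j ih =>
      intro hj
      by_cases hji : j < i
      · rw [Nat.mod_eq_of_lt hji]
      · have h1 : s[j]? = s[j - i]? := by
          have := h (j - i) (by omega)
          rwa [show i + (j - i) = j by omega] at this
        rw [h1, ih (j - i) (by omega) (by omega), mod_sub_self i j (by omega)]

lemma phase1_pointwise (s : List Char) (i : Nat) (hi : 1 ≤ i) (h2 : i ≤ s.length / 2) :
    PySem.Chars.startswith s (List.flatten (List.replicate (s.length / i) (s.take i)))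
      = ((s.drop i).take (i * (s.length / i) - i) == s.take (i * (s.length / i) - i)) := by
  set n := s.length with hn
  set k := n / i with hk
  have hk1 : 1 ≤ k := by
    rw [hk]; exact Nat.one_le_div_iff (by omega) |>.mpr (by
      have := Nat.le_div_iff_mul_le (by omega : 0 < 2) |>.mp h2; omega)
  have hmle : i * k ≤ n := by rw [hk, Nat.mul_comm]; exact Nat.div_mul_le_self n i
  have hp : (s.take i).length = i := by
    rw [List.length_take]
    have : i * 1 ≤ i * k := Nat.mul_le_mul_left _ hk1
    omega
  rw [Bool.eq_iff_iff]
  rw [PySem.Chars.startswith_iff, beq_iff_eq, List.prefix_iff_eq_take]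
  have hlen : (List.flatten (List.replicate k (s.take i))).length = i * k := by
    simp only [List.length_flatten, List.map_replicate, List.sum_replicate, smul_eq_mul, hp]
    ring
  rw [hlen]
  constructor
  · intro h
    rw [shift_iff_Q s i (i * k), ← P_iff_Q s i (i * k) hi,
      ← take_eq_flatten_iff_P s i k hi hk1 hmle]
    exact h.symm
  · intro h
    rw [shift_iff_Q s i (i * k), ← P_iff_Q s i (i * k) hi,
      ← take_eq_flatten_iff_P s i k hi hk1 hmle] at h
    exact h.symm

lemma pvAScan_iff (s : List Char) (L : Nat) :
    ∀ (idxs : List Nat) (seen : PySem.Set (List Char)),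
      pvAScan s L idxs seen = true ↔
        (∃ i ∈ idxs, (s.drop i).take L ∈ seen) ∨
          ¬ (idxs.map (fun i => (s.drop i).take L)).Nodup := by
  intro idxs
  induction idxs with
  | nil => intro seen; simp [pvAScan]
  | cons i rest ih =>
    intro seen
    simp only [pvAScan]
    by_cases hc : ((s.drop i).take L) ∈ seen
    · rw [if_pos (by rwa [PySem.Set.contains_iff])]
      simp only [true_iff]
      exact Or.inl ⟨i, List.mem_cons_self, hc⟩
    · rw [if_neg (by rw [PySem.Set.contains_iff]; exact hc)]
      rw [ih (seen.add ((s.drop i).take L))]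
      simp only [List.map_cons, List.nodup_cons, List.mem_cons, List.mem_map]
      constructor
      · rintro (⟨j, hj, hmem⟩ | hnd)
        · rw [PySem.Set.mem_add] at hmem
          rcases hmem with h | h
          · exact Or.inl ⟨j, Or.inr hj, h⟩
          · exact Or.inr (fun ⟨hni, _⟩ => hni ⟨j, hj, h⟩)
        · exact Or.inr (fun ⟨_, hn⟩ => hnd hn)
      · rintro (⟨j, hj, hmem⟩ | hnd)
        · rcases hj with rfl | hj
          · exact absurd hmem hc
          · exact Or.inl ⟨j, hj, (PySem.Set.mem_add _ _ _).mpr (Or.inl hmem)⟩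
        · by_cases hni : ∃ j ∈ rest, (s.drop j).take L = (s.drop i).take L
          · obtain ⟨j, hj, hje⟩ := hni
            exact Or.inl ⟨j, hj, (PySem.Set.mem_add _ _ _).mpr (Or.inr hje)⟩
          · refine Or.inr (fun hn => hnd ⟨fun h => hni ?_, hn⟩)
            obtain ⟨j, hj, hje⟩ := h
            exact ⟨j, hj, hje⟩

lemma not_nodup_map_range_iff {α : Type} (f : Nat → α) (m : Nat) :
    ¬ ((List.range m).map f).Nodup ↔ ∃ i j, i < j ∧ j < m ∧ f i = f j := by
  rw [List.nodup_iff_pairwise_ne, List.pairwise_map, List.pairwise_iff_getElem]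
  constructor
  · intro h
    push Not at h
    obtain ⟨a, b, ha, hb, hab, he⟩ := h
    refine ⟨(List.range m)[a], (List.range m)[b], ?_, ?_, by simpa using he⟩
    · simp only [List.getElem_range]
      simpa [List.length_range] using (by simpa using hab : a < b)
    · simp only [List.getElem_range]
      simpa using hb
  · rintro ⟨i, j, hij, hjm, he⟩ h
    exact h i j (by simpa using (by omega : i < m)) (by simpa using hjm) hij (by simpa using he)

lemma trigram_of_dup (s : List Char) (L i j : Nat) (hL : 3 ≤ L)
    (h : (s.drop i).take L = (s.drop j).take L) :
    (s.drop i).take 3 = (s.drop j).take 3 := by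
  have := congrArg (List.take 3) h
  rwa [List.take_take, List.take_take, Nat.min_eq_left hL] at this

lemma len_foldl_add_le {α : Type} [BEq α] [LawfulBEq α] (xs : List α) :
    ∀ (s : PySem.Set α), (xs.foldl PySem.Set.add s).length ≤ s.length + xs.length := by
  induction xs with
  | nil => intro s; simp
  | cons y ys ih =>
    intro s
    have h := ih (s.add y)
    have : (s.add y).length ≤ s.length + 1 := by
      rw [PySem.Set.add_eq_ite]
      split <;> simp
    simp only [List.foldl_cons, List.length_cons]
    omega

lemma len_foldl_add_lt_of_mem {α : Type} [BEq α] [LawfulBEq α] (xs : List α) :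
    ∀ (s : PySem.Set α), (∃ x ∈ xs, x ∈ s) →
      (xs.foldl PySem.Set.add s).length < s.length + xs.length := by
  induction xs with
  | nil => rintro s ⟨x, hx, _⟩; simp at hx
  | cons y ys ih =>
    rintro s ⟨x, hx, hxs⟩
    simp only [List.foldl_cons, List.length_cons]
    by_cases hy : y ∈ s
    · rw [PySem.Set.add_of_mem hy]
      have := len_foldl_add_le ys s
      omega
    · rcases List.mem_cons.mp hx with rfl | hx'
      · exact absurd hxs hy
      · have := ih (s.add y) ⟨x, hx', (PySem.Set.mem_add _ _ _).mpr (Or.inl hxs)⟩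
        rw [PySem.Set.add_of_not_mem hy] at this ⊢
        simp only [List.length_append, List.length_cons, List.length_nil] at this ⊢
        omega

lemma len_foldl_add_lt_of_not_nodup {α : Type} [BEq α] [LawfulBEq α] (xs : List α) :
    ∀ (s : PySem.Set α), ¬ xs.Nodup →
      (xs.foldl PySem.Set.add s).length < s.length + xs.length := by
  induction xs with
  | nil => intro s h; simp at h
  | cons y ys ih =>
    intro s h
    rw [List.nodup_cons] at h
    simp only [List.foldl_cons, List.length_cons]
    by_cases hy : y ∈ ys
    · have := len_foldl_add_lt_of_mem ys (s.add y)
        ⟨y, hy, (PySem.Set.mem_add _ _ _).mpr (Or.inr rfl)⟩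
      have hl : (s.add y).length ≤ s.length + 1 := by
        rw [PySem.Set.add_eq_ite]; split <;> simp
      omega
    · have hnd : ¬ ys.Nodup := fun hn => h ⟨hy, hn⟩
      have := ih (s.add y) hnd
      have hl : (s.add y).length ≤ s.length + 1 := by
        rw [PySem.Set.add_eq_ite]; split <;> simp
      omega

lemma ofList_length_ne_iff {α : Type} [BEq α] [LawfulBEq α] (xs : List α) :
    (PySem.Set.ofList xs).length ≠ xs.length ↔ ¬ xs.Nodup := by
  constructor
  · intro h hnd
    exact h (by rw [PySem.Set.ofList_eq_self_of_nodup xs hnd])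
  · intro h
    have := len_foldl_add_lt_of_not_nodup xs ([] : PySem.Set α) h
    rw [PySem.Set.ofList_eq_foldl]
    simp only [List.length_nil] at this
    omega

lemma phase2_eq (s : List Char) :
    ((List.range' 3 (min (s.length / 2) 8 - 3)).any (fun L =>
        pvAScan s L (List.range (s.length - L + 1)) PySem.Set.empty))
      = (if 8 ≤ s.length then
          (PySem.Set.ofList ((List.range (s.length - 2)).map (fun i => (s.drop i).take 3))).length
            != ((List.range (s.length - 2)).map (fun i => (s.drop i).take 3)).length
        else false) := by
  set n := s.length with hn
  rw [Bool.eq_iff_iff, List.any_eq_true]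
  constructor
  · rintro ⟨L, hL, hscan⟩
    rw [List.mem_range'_1] at hL
    have hmin : 3 < min (n / 2) 8 := by omega
    have hn8 : 8 ≤ n := by
      have : 4 ≤ n / 2 := by omega
      have := (Nat.le_div_iff_mul_le (by omega : 0 < 2)).mp this
      omega
    have hLn : 2 * (L + 1) ≤ n := by
      have hLd : L + 1 ≤ n / 2 := by omega
      have := (Nat.le_div_iff_mul_le (by omega : 0 < 2)).mp hLd
      omega
    rw [pvAScan_iff] at hscan
    rcases hscan with ⟨i, _, hmem⟩ | hnd
    · simp [PySem.Set.empty] at hmem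
    · rw [not_nodup_map_range_iff] at hnd
      obtain ⟨i, j, hij, hjm, he⟩ := hnd
      rw [if_pos hn8, bne_iff_ne, ofList_length_ne_iff, not_nodup_map_range_iff]
      exact ⟨i, j, hij, by omega, trigram_of_dup s L i j (by omega) he⟩
  · intro h
    by_cases hn8 : 8 ≤ n
    · rw [if_pos hn8, bne_iff_ne, ofList_length_ne_iff, not_nodup_map_range_iff] at h
      obtain ⟨i, j, hij, hjm, he⟩ := h
      have hmin : 4 ≤ min (n / 2) 8 := by
        have : 4 ≤ n / 2 := (Nat.le_div_iff_mul_le (by omega : 0 < 2)).mpr (by omega)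
        omega
      refine ⟨3, by rw [List.mem_range'_1]; omega, ?_⟩
      rw [pvAScan_iff]
      refine Or.inr ?_
      rw [show n - 3 + 1 = n - 2 by omega, not_nodup_map_range_iff]
      exact ⟨i, j, hij, hjm, he⟩
    · rw [if_neg hn8] at h
      exact absurd h (by simp)

-- ===== VERDICT (by name: the statement is the Claim_ definition above) =====
theorem has_repeated_patterns_py_spec : Claim_equal_has_repeated_patterns_py := by
  intro text _
  unfold Spec_has_repeated_patterns_py
  simp only [has_repeated_patterns_py, has_repeated_patterns_py_alt]
  set s := text.toList with hs
  have h1 : ((List.range' 1 (s.length / 2)).any (fun i =>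
        PySem.Chars.startswith s (List.flatten (List.replicate (s.length / i) (s.take i)))))
      = ((List.range' 1 (s.length / 2)).any (fun i =>
        (s.drop i).take (i * (s.length / i) - i) == s.take (i * (s.length / i) - i))) := by
    rw [Bool.eq_iff_iff, List.any_eq_true, List.any_eq_true]
    constructor
    · rintro ⟨i, hi, h⟩
      rw [List.mem_range'_1] at hi
      exact ⟨i, by rw [List.mem_range'_1]; omega,
        by rw [← phase1_pointwise s i (by omega) (by omega)]; exact h⟩
    · rintro ⟨i, hi, h⟩
      rw [List.mem_range'_1] at hi
      exact ⟨i, by rw [List.mem_range'_1]; omega,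
        by rw [phase1_pointwise s i (by omega) (by omega)]; exact h⟩
  rw [h1, phase2_eq]
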